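-- pv_equiv track=rewrite | github.com/insistgang/teacherZ-C | citation_analysis/citation_analyzer.py | compute_g_index
-- ===== SOURCE A (Python) =====
-- from typing import List, Dict, Tuple, Optional, Set
--
-- def compute_g_index(citations: List[int]) -> int:
--     """计算g-index
--
--     g-index: 前g篇论文的总引用次数 >= g^2
--     """
--     if not citations:
--         return 0
--
--     sorted_citations = sorted(citations, reverse=True)
--     g_index = 0
--
--     for i in range(1, len(sorted_citations) + 1):
--         if sum(sorted_citations[:i]) >= i ** 2:
--             g_index = i
--         else:
--             break
--
--     return g_index
-- ===== SOURCE B (Python) =====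
-- def compute_g_index(citations):
--     # Single pass over the descending-sorted list with an incremental
--     # prefix sum, instead of re-summing the prefix at every step.
--     total = 0
--     g = 0
--     for c in sorted(citations, reverse=True):
--         total += c
--         if total >= (g + 1) ** 2:
--             g += 1
--         else:
--             break
--     return g
-- ===== Notes on version B (the rewrite author's own statement) =====
-- stated objective: faster
-- what changed: Replaces the per-iteration sum(sorted[:i]) prefix re-summation with a single pass that maintains an incremental running prefix sum.
import Mathlib
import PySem

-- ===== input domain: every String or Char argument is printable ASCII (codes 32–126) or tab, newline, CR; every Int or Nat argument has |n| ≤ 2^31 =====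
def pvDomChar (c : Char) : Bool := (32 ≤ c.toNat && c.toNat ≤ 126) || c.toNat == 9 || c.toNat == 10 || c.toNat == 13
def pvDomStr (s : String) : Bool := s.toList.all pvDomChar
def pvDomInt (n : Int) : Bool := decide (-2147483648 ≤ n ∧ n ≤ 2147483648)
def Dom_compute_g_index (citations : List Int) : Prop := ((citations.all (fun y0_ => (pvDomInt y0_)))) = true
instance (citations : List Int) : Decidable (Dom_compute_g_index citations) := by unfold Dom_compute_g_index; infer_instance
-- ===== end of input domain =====

-- B replaces A's per-iteration prefix re-summation with a single pass keeping a running prefix sum (faster).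


-- ===== PORT A =====
-- A's loop: for i in range(1, n+1): if sum(s[:i]) >= i**2: g = i else: break
-- fuel = number of remaining iterations; s[:i] with i ≥ 0 is s.take i (exact for nonnegative i).
def gLoopA (s : List Int) : Nat → Nat → Int → Int
  | 0, _, g => g
  | Nat.succ fuel, i, g =>
    if (s.take i).sum ≥ (i : Int) ^ 2 then gLoopA s fuel (i + 1) (i : Int) else g

def compute_g_index (citations : List Int) : Int :=
  if citations = [] then 0
  else
    let sorted_citations := PySem.List.sorted citations (fun x => x) true
    gLoopA sorted_citations sorted_citations.length 1 0

-- ===== PORT B =====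
-- B's loop: total += c; if total >= (g+1)**2: g += 1 else: break
def gLoopB : List Int → Int → Int → Int
  | [], _, g => g
  | c :: rest, total, g =>
    let t := total + c
    if t ≥ (g + 1) ^ 2 then gLoopB rest t (g + 1) else g

def compute_g_index_alt (citations : List Int) : Int :=
  gLoopB (PySem.List.sorted citations (fun x => x) true) 0 0

-- ===== PRECONDITION & SPEC =====
def Spec_compute_g_index (citations : List Int) (out : Int) : Prop := out = compute_g_index_alt citations
instance (citations : List Int) (out : Int) : Decidable (Spec_compute_g_index citations out) := by unfold Spec_compute_g_index; infer_instance

-- ===== CLAIM (what is proved, stated in full; the proofs are below) =====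
def Claim_equal_compute_g_index : Prop := ∀ (citations : List Int), Dom_compute_g_index citations → Spec_compute_g_index citations (compute_g_index citations)

-- ===== LEMMAS AND PROOFS =====

-- Invariant: after consuming `pre`, A is at i = pre.length + 1 with g = pre.length,
-- and B holds total = pre.sum, g = pre.length.
theorem gLoop_eq (rest : List Int) : ∀ (pre : List Int),
    gLoopA (pre ++ rest) rest.length (pre.length + 1) (pre.length : Int)
      = gLoopB rest pre.sum (pre.length : Int) := by
  induction rest with
  | nil => intro pre; simp [gLoopA, gLoopB]
  | cons c rest ih =>
    intro pre
    have htake : (pre ++ c :: rest).take (pre.length + 1) = pre ++ [c] := by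
      rw [List.take_append]
      simp
    simp only [List.length_cons, gLoopA, gLoopB, htake, List.sum_append, List.sum_cons,
      List.sum_nil, add_zero]
    push_cast
    split
    · have := ih (pre ++ [c])
      simp only [List.length_append, List.length_cons, List.length_nil, List.sum_append,
        List.sum_cons, List.sum_nil, add_zero, List.append_assoc, List.cons_append,
        List.nil_append] at this
      rw [show pre.length + 1 + 1 = pre.length + 2 by ring] at this
      push_cast at this
      convert this using 2
    · rfl

-- ===== VERDICT (by name: the statement is the Claim_ definition above) =====
theorem compute_g_index_spec : Claim_equal_compute_g_index := by
  intro citations _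
  unfold Spec_compute_g_index compute_g_index compute_g_index_alt
  split
  · rename_i h
    subst h
    rfl
  · have := gLoop_eq (PySem.List.sorted citations (fun x => x) true) []
    simpa using this
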